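-- pv_equiv track=rewrite | github.com/denis-sukhoverkhov/kb | python/algorithms/search/bsearch.py | bsearch_in_matrix
-- ===== SOURCE A (Python) =====
-- def bsearch(numbers, val):
--     first = 0
--     last = len(numbers) - 1
--     index = None
--
--     while first <= last:
--         mid = (first + last) // 2
--
--         if numbers[mid] == val:
--             index = mid
--             break
--         elif numbers[mid] > val:
--             last = mid - 1
--         else:
--             first = mid + 1
--
--     return index
--
-- def bsearch_in_matrix(A, B):
--     arr = []
--     for i in A:
--         arr += i
--
--     idx = bsearch(arr, B)
--
--     if idx is not None:
--         return 1
--     else: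
--         return 0
-- ===== SOURCE B (Python) =====
-- def _flat_get(A, k):
--     # element at flattened index k (0 <= k < total number of elements)
--     for row in A:
--         n = len(row)
--         if k < n:
--             return row[k]
--         k -= n
--     return 0  # unreachable for in-range k
--
--
-- def bsearch_in_matrix(A, B):
--     total = 0
--     for row in A:
--         total += len(row)
--     first, last = 0, total - 1
--     while first <= last:
--         mid = (first + last) // 2
--         x = _flat_get(A, mid)
--         if x == B:
--             return 1
--         if x > B:
--             last = mid - 1
--         else:
--             first = mid + 1
--     return 0
-- ===== Notes on version B (the rewrite author's own statement) =====
-- stated objective: alternative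
-- what changed: B never materializes the flattened array: it binary-searches a virtual flattened view, locating each probed index inside the rows on demand, instead of concatenating all rows first and then binary-searching the copy.
import Mathlib
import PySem

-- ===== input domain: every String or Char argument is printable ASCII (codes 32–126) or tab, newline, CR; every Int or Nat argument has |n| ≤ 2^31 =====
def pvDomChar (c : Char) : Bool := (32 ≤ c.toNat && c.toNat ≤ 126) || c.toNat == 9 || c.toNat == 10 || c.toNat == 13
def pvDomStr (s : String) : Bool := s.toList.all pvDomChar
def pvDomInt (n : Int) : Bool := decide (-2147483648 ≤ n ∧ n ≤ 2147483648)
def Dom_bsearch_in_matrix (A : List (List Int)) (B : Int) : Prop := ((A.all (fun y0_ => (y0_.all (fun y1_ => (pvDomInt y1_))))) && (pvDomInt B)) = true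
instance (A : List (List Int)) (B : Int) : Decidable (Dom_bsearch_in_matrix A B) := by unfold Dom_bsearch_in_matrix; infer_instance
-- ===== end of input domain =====

-- B binary-searches a virtual flattened view of the matrix (locating each probed
-- index inside the rows on demand) instead of concatenating all rows first; same
-- return value everywhere.

-- ===== PORT A =====
-- the while-loop of bsearch; numbers[mid] read via pyGet? — the call site only ever
-- probes indices in [first, last] ⊆ [0, len-1], so the .getD 0 default is never used
def bsearchAux (numbers : List Int) (val first last : Int) : Option Int :=
  if h : first ≤ last then
    let mid := PySem.Int.floordiv (first + last) 2
    let x := (PySem.List.pyGet? numbers mid).getD 0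
    if x = val then some mid
    else if x > val then bsearchAux numbers val first (mid - 1)
    else bsearchAux numbers val (mid + 1) last
  else none
termination_by (last + 1 - first).toNat
decreasing_by
  · have := PySem.Int.floordiv_two_mid_bounds h; omega
  · have := PySem.Int.floordiv_two_mid_bounds h; omega

def bsearch_in_matrix (A : List (List Int)) (B : Int) : Int :=
  let arr := A.foldl (fun acc i => acc ++ i) []
  match bsearchAux arr B 0 ((arr.length : Int) - 1) with
  | some _ => 1
  | none => 0

-- ===== PORT B =====
-- _flat_get: walk the rows, subtracting lengths, until index k lands in a row
def flatGet (rows : List (List Int)) (k : Int) : Int :=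
  match rows with
  | [] => 0  -- unreachable for in-range k
  | r :: rs =>
      if k < (r.length : Int) then (PySem.List.pyGet? r k).getD 0
      else flatGet rs (k - (r.length : Int))

def altAux (A : List (List Int)) (B first last : Int) : Int :=
  if h : first ≤ last then
    let mid := PySem.Int.floordiv (first + last) 2
    let x := flatGet A mid
    if x = B then 1
    else if x > B then altAux A B first (mid - 1)
    else altAux A B (mid + 1) last
  else 0
termination_by (last + 1 - first).toNat
decreasing_by
  · have := PySem.Int.floordiv_two_mid_bounds h; omega
  · have := PySem.Int.floordiv_two_mid_bounds h; omega

def bsearch_in_matrix_alt (A : List (List Int)) (B : Int) : Int :=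
  let total := A.foldl (fun t row => t + (row.length : Int)) 0
  altAux A B 0 (total - 1)

-- ===== PRECONDITION & SPEC =====
def Spec_bsearch_in_matrix (A : List (List Int)) (B : Int) (out : Int) : Prop := out = bsearch_in_matrix_alt A B
instance (A : List (List Int)) (B : Int) (out : Int) : Decidable (Spec_bsearch_in_matrix A B out) := by unfold Spec_bsearch_in_matrix; infer_instance

-- ===== CLAIM (what is proved, stated in full; the proofs are below) =====
def Claim_equal_bsearch_in_matrix : Prop := ∀ (A : List (List Int)) (B : Int), Dom_bsearch_in_matrix A B → Spec_bsearch_in_matrix A B (bsearch_in_matrix A B)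

-- ===== LEMMAS AND PROOFS =====

-- A's arr (built by repeated +=) is the flattening of the matrix
theorem foldl_append_flatten (A : List (List Int)) (acc : List Int) :
    A.foldl (fun acc i => acc ++ i) acc = acc ++ A.flatten := by
  induction A generalizing acc with
  | nil => simp
  | cons r rs ih => simp [List.foldl_cons, ih, List.flatten_cons]

-- B's total is the length of the flattening
theorem foldl_len_flatten (A : List (List Int)) (t : Int) :
    A.foldl (fun t row => t + (row.length : Int)) t = t + (A.flatten.length : Int) := by
  induction A generalizing t with
  | nil => simp
  | cons r rs ih => simp [List.foldl_cons, ih, List.flatten_cons]; ring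

-- B's on-demand lookup equals indexing the flattened list
theorem flatGet_eq (A : List (List Int)) (k : Int) (h0 : 0 ≤ k)
    (hk : k < (A.flatten.length : Int)) :
    flatGet A k = (PySem.List.pyGet? A.flatten k).getD 0 := by
  induction A generalizing k with
  | nil => simp at hk; omega
  | cons r rs ih =>
      obtain ⟨n, rfl⟩ : ∃ n : Nat, k = (n : Int) := ⟨k.toNat, by omega⟩
      simp only [flatGet, List.flatten_cons]
      by_cases hlt : (n : Int) < (r.length : Int)
      · simp only [hlt, if_true]
        rw [PySem.List.pyGet?_natCast, PySem.List.pyGet?_natCast,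
          List.getElem?_append_left (by omega)]
      · simp only [hlt, if_false]
        have hlen : (List.flatten (r :: rs)).length = r.length + rs.flatten.length := by
          simp [List.flatten_cons]
        rw [ih ((n : Int) - r.length) (by omega) (by omega)]
        have hk2 : (n : Int) - (r.length : Int) = ((n - r.length : Nat) : Int) := by omega
        rw [hk2, PySem.List.pyGet?_natCast, PySem.List.pyGet?_natCast,
          List.getElem?_append_right (by omega)]

-- the two search loops agree as long as all probed indices are in range
theorem loops_agree (A : List (List Int)) (B : Int) (first last : Int)
    (h0 : 0 ≤ first) (hl : last < (A.flatten.length : Int)) :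
    (match bsearchAux A.flatten B first last with
     | some _ => (1 : Int)
     | none => 0) = altAux A B first last := by
  by_cases h : first ≤ last
  · have hmid := PySem.Int.floordiv_two_mid_bounds h
    rw [bsearchAux, altAux]
    simp only [h, dif_pos]
    rw [flatGet_eq A _ (by omega) (by omega)]
    set x := (PySem.List.pyGet? A.flatten (PySem.Int.floordiv (first + last) 2)).getD 0 with hx
    by_cases h1 : x = B
    · simp [h1]
    · simp only [h1, if_false]
      by_cases h2 : x > B
      · simp only [h2, if_true]
        exact loops_agree A B first (PySem.Int.floordiv (first + last) 2 - 1) h0 (by omega)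
      · simp only [h2, if_false]
        exact loops_agree A B (PySem.Int.floordiv (first + last) 2 + 1) last (by omega) hl
  · rw [bsearchAux, altAux]
    simp [h]
termination_by (last + 1 - first).toNat
decreasing_by
  · have := PySem.Int.floordiv_two_mid_bounds h; omega
  · have := PySem.Int.floordiv_two_mid_bounds h; omega

-- ===== VERDICT (by name: the statement is the Claim_ definition above) =====
theorem bsearch_in_matrix_spec : Claim_equal_bsearch_in_matrix := by
  intro A B _
  unfold Spec_bsearch_in_matrix bsearch_in_matrix bsearch_in_matrix_alt
  rw [foldl_append_flatten, foldl_len_flatten]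
  simp only [List.nil_append, Int.zero_add]
  exact loops_agree A B 0 ((A.flatten.length : Int) - 1) le_rfl (by omega)
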